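-- pv_equiv track=rewrite | github.com/efcawesome/AdventOfCode2024 | day21.py | get_intermediate_sequences_len
-- ===== SOURCE A (Python) =====
-- dirpad = {            "^":(0, 1), 'A':(0, 2),
--           "<":(1, 0), "v":(1, 1), ">":(1, 2)}
--
-- results = {}
--
-- def get_intermediate_sequences_len(sequence, repeats):
--     if repeats == 0:
--         return len(sequence)
--
--     if (sequence, repeats) in results:
--         return results[(sequence, repeats)]
--
--     key_rob_pos = (0, 2)
--     length = 0
--
--     for c in sequence:
--         pos_y, pos_x = dirpad[c]
--
--         dy = pos_y - key_rob_pos[0]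
--         dx = pos_x - key_rob_pos[1]
--
--         y_char = "^" if dy < 0 else "v"
--         x_char = "<" if dx < 0 else ">"
--
--         x_count = x_char * abs(dx)
--         y_count = y_char * abs(dy)
--
--         l1 = 1000000000000000000
--         l2 = 1000000000000000000
--
--         if key_rob_pos[1] != 0 or key_rob_pos[0] + dy != 0:
--             l1 = get_intermediate_sequences_len(y_count + x_count + "A", repeats - 1)
--         if key_rob_pos[0] != 0 or key_rob_pos[1] + dx != 0:
--             l2 = get_intermediate_sequences_len(x_count + y_count + "A", repeats - 1)
--
--         length += min(l1, l2)
--         key_rob_pos = (pos_y, pos_x)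
--
--     results[(sequence, repeats)] = length
--
--     return length
-- ===== SOURCE B (Python) =====
-- dirpad = {            "^":(0, 1), 'A':(0, 2),
--           "<":(1, 0), "v":(1, 1), ">":(1, 2)}
--
-- _KEYS = "^A<v>"
--
-- def _path_cost(cost, moves):
--     total = 0
--     prev = "A"
--     for c in moves:
--         total += cost[(prev, c)]
--         prev = c
--     return total
--
-- def get_intermediate_sequences_len(sequence, repeats):
--     if repeats == 0:
--         return len(sequence)
--     # bottom-up: cost[(p, c)] = presses at the bottom keyboard to move a
--
--     # depth-d robot from p to c and push it, starting with depth 0 = 1 press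
--     cost = {(p, c): 1 for p in _KEYS for c in _KEYS}
--     for _ in range(repeats):
--         prev_cost = cost
--         cost = {}
--         for p in _KEYS:
--             qy, qx = dirpad[p]
--             for c in _KEYS:
--                 py, px = dirpad[c]
--                 dy = py - qy
--                 dx = px - qx
--                 y_count = ("^" if dy < 0 else "v") * abs(dy)
--                 x_count = ("<" if dx < 0 else ">") * abs(dx)
--                 l1 = 1000000000000000000
--                 l2 = 1000000000000000000
--                 if qx != 0 or py != 0:
--                     l1 = _path_cost(prev_cost, y_count + x_count + "A")
--                 if qy != 0 or px != 0:
--                     l2 = _path_cost(prev_cost, x_count + y_count + "A")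
--                 cost[(p, c)] = min(l1, l2)
--     return _path_cost(cost, sequence)
-- ===== Notes on version B (the rewrite author's own statement) =====
-- stated objective: alternative
-- what changed: B replaces A's memoized top-down recursion on whole move strings by a bottom-up dynamic program: a 5x5 per-transition cost table iterated `repeats` times, then summed over adjacent pairs of the sequence (with A's exact gap guards and sentinel).
-- outside the precondition, e.g. on get_intermediate_sequences_len('v', 905): A returns 2578161182015646165705, B returns 2578161182015646165705
import Mathlib
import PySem

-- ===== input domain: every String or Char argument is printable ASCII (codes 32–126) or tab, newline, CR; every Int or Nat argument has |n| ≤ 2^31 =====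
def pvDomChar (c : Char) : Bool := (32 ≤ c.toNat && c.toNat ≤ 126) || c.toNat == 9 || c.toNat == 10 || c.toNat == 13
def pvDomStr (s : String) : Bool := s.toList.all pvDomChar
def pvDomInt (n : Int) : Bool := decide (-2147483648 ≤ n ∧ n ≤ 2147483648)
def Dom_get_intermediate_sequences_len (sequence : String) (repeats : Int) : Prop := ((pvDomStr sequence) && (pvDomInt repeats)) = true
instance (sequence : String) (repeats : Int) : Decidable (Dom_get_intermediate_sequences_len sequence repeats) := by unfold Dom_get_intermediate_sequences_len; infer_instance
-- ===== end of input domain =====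

-- B replaces A's memoized top-down recursion on whole move strings by a bottom-up DP:
-- a 5×5 per-transition cost table iterated `repeats` times, then summed over the
-- sequence's adjacent pairs; equal return values (the Python memo dicts are pure caches).

-- shared module-level constant: the dirpad lookup table (none = KeyError in Python, excluded by Pre_)
def dirpadA (c : Char) : Option (Int × Int) :=
  if c = '^' then some (0, 1)
  else if c = 'A' then some (0, 2)
  else if c = '<' then some (1, 0)
  else if c = 'v' then some (1, 1)
  else if c = '>' then some (1, 2)
  else none

-- ===== PORT A =====
-- A's recursion decrements `repeats`; ported on `repeats.toNat` (Python diverges for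
-- repeats < 0, excluded by Pre_).  The module-level memo dict `results` is threaded
-- through the recursion, keyed like Python's (sequence, repeats).  Python's dict is a
-- hash map; it is ported as an association list (List.lookup) with newest-first
-- insertion — keys are unique (A only stores a key after a miss), so every lookup
-- yields the same value.

-- one step of A's `for c in sequence` loop; state = (key_rob_pos, length, results);
-- `recur` is the recursive call at repeats - 1
def aStep (recur : List Char → List ((List Char × Nat) × Int) → Int × List ((List Char × Nat) × Int))
    (st : (Int × Int) × Int × List ((List Char × Nat) × Int)) (c : Char) :
    (Int × Int) × Int × List ((List Char × Nat) × Int) :=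
  let pos := st.1
  let length := st.2.1
  let results := st.2.2
  let p := (dirpadA c).getD (0, 0)    -- KeyError for other chars: excluded by Pre_
  let dy := p.1 - pos.1
  let dx := p.2 - pos.2
  let yChar := if dy < 0 then '^' else 'v'
  let xChar := if dx < 0 then '<' else '>'
  let xCount := List.replicate dx.natAbs xChar
  let yCount := List.replicate dy.natAbs yChar
  let r1 := if pos.2 ≠ 0 ∨ pos.1 + dy ≠ 0 then recur (yCount ++ xCount ++ ['A']) results
            else (1000000000000000000, results)
  let r2 := if pos.1 ≠ 0 ∨ pos.2 + dx ≠ 0 then recur (xCount ++ yCount ++ ['A']) r1.2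
            else (1000000000000000000, r1.2)
  (p, length + min r1.1 r2.1, r2.2)

def aRec : Nat → List Char → List ((List Char × Nat) × Int) →
    Int × List ((List Char × Nat) × Int)
  | 0 => fun s results => ((s.length : Int), results)
  | n + 1 => fun s results =>
    match results.lookup (s, n + 1) with
    | some v => (v, results)
    | none =>
      let st := s.foldl (aStep (aRec n)) ((0, 2), 0, results)
      (st.2.1, ((s, n + 1), st.2.1) :: st.2.2)

-- beyond Pre_'s bound A raises RecursionError in Python and the recursion is deeper
-- than the evaluator's stack: sentinel 0 there (excluded by Pre_)
def get_intermediate_sequences_len (sequence : String) (repeats : Int) : Int :=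
  if repeats.toNat ≤ 900 then (aRec repeats.toNat sequence.toList []).1 else 0

-- ===== PORT B =====
def keysB : List Char := ['^', 'A', '<', 'v', '>']

-- _path_cost's loop: prev/total accumulator over the move characters
def bPathGo (cost : PySem.Dict (Char × Char) Int) (prev : Char) (cs : List Char) (total : Int) : Int :=
  match cs with
  | [] => total
  | c :: rest => bPathGo cost c rest (total + cost.getD (prev, c) 0)  -- KeyError: excluded by Pre_

-- the {(p, c): …} comprehension over the 25 key pairs
def bBuild (f : Char → Char → Int) : PySem.Dict (Char × Char) Int :=
  keysB.foldl (fun d p => keysB.foldl (fun d c => d.insert (p, c) (f p c)) d) PySem.Dict.empty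

-- the per-pair entry of one iteration, with `path` looking into the previous table
def bEntry (path : List Char → Int) (p c : Char) : Int :=
  let q := (dirpadA p).getD (0, 0)
  let pp := (dirpadA c).getD (0, 0)
  let dy := pp.1 - q.1
  let dx := pp.2 - q.2
  let yCount := List.replicate dy.natAbs (if dy < 0 then '^' else 'v')
  let xCount := List.replicate dx.natAbs (if dx < 0 then '<' else '>')
  let l1 := if q.2 ≠ 0 ∨ pp.1 ≠ 0 then path (yCount ++ xCount ++ ['A'])
            else 1000000000000000000
  let l2 := if q.1 ≠ 0 ∨ pp.2 ≠ 0 then path (xCount ++ yCount ++ ['A'])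
            else 1000000000000000000
  min l1 l2

-- one iteration: the new table from the previous one
def bStepT (prev_cost : PySem.Dict (Char × Char) Int) : PySem.Dict (Char × Char) Int :=
  bBuild (bEntry (fun mv => bPathGo prev_cost 'A' mv 0))

-- the `for _ in range(repeats)` loop building the table bottom-up
def bTable (r : Nat) : PySem.Dict (Char × Char) Int :=
  (List.range r).foldl (fun t _ => bStepT t) (bBuild (fun _ _ => 1))

-- beyond Pre_'s bound (outside every claim) the table iteration is deeper than the
-- evaluator's stack: sentinel 0 there (excluded by Pre_)
def get_intermediate_sequences_len_alt (sequence : String) (repeats : Int) : Int :=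
  if repeats = 0 then (sequence.toList.length : Int)
  else if repeats.toNat ≤ 900 then bPathGo (bTable repeats.toNat) 'A' sequence.toList 0
  else 0

-- ===== PRECONDITION & SPEC =====
-- Pre_ excludes the inputs where Python A raises: repeats < 0 (unbounded recursion,
-- RecursionError); for repeats ≠ 0, characters outside the dirpad (KeyError); and
-- repeats > 900 — A recurses once per repeat, so beyond CPython's default recursion
-- limit (1000) it raises RecursionError, and the bound is conservative because near
-- the limit whether A returns depends on the caller's stack depth and on memo state.
def Pre_get_intermediate_sequences_len (sequence : String) (repeats : Int) : Prop :=
  0 ≤ repeats ∧ repeats ≤ 900 ∧ (repeats = 0 ∨ sequence.toList.all (fun c => c ∈ (['^', 'A', '<', 'v', '>'] : List Char)) = true)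
instance (sequence : String) (repeats : Int) : Decidable (Pre_get_intermediate_sequences_len sequence repeats) := by
  unfold Pre_get_intermediate_sequences_len; infer_instance

def pvWitness_get_intermediate_sequences_len : String × Int := ("<A", 2)

def Spec_get_intermediate_sequences_len (sequence : String) (repeats : Int) (out : Int) : Prop := out = get_intermediate_sequences_len_alt sequence repeats
instance (sequence : String) (repeats : Int) (out : Int) : Decidable (Spec_get_intermediate_sequences_len sequence repeats out) := by unfold Spec_get_intermediate_sequences_len; infer_instance

-- ===== CLAIM (what is proved, stated in full; the proofs are below) =====
def Claim_equal_get_intermediate_sequences_len : Prop := ∀ (sequence : String) (repeats : Int), Dom_get_intermediate_sequences_len sequence repeats → Pre_get_intermediate_sequences_len sequence repeats → Spec_get_intermediate_sequences_len sequence repeats (get_intermediate_sequences_len sequence repeats)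

-- ===== LEMMAS AND PROOFS =====

-- pure reference recursion (proof-only): per-transition cost at a depth, and path
-- sums through an arbitrary transition-cost function
def pPathGo (cost : Char → Char → Int) (prev : Char) (cs : List Char) (total : Int) : Int :=
  match cs with
  | [] => total
  | c :: rest => pPathGo cost c rest (total + cost prev c)

def pCost : Nat → Char → Char → Int
  | 0 => fun _ _ => 1
  | n + 1 => fun p c => bEntry (fun mv => pPathGo (pCost n) 'A' mv 0) p c

lemma pPathGo_one (prev : Char) (cs : List Char) (t : Int) :
    pPathGo (fun _ _ => (1 : Int)) prev cs t = t + cs.length := by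
  induction cs generalizing prev t with
  | nil => simp [pPathGo]
  | cons c rest ih => simp [pPathGo, ih]; ring

lemma pPathGo_zero (prev : Char) (cs : List Char) (t : Int) :
    pPathGo (pCost 0) prev cs t = t + cs.length := by
  rw [show pCost 0 = (fun _ _ => (1 : Int)) from rfl, pPathGo_one]

-- bEntry only looks at good move strings
lemma bEntry_congr (p1 p2 : List Char → Int) (p c : Char)
    (h : ∀ mv, (∀ x ∈ mv, x ∈ keysB) → p1 mv = p2 mv) :
    bEntry p1 p c = bEntry p2 p c := by
  have hm : ∀ (k j : Nat) (a b : Char), a ∈ keysB → b ∈ keysB →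
      ∀ x ∈ List.replicate k a ++ List.replicate j b ++ ['A'], x ∈ keysB := by
    intro k j a b ha hb x hx
    simp only [List.mem_append, List.mem_replicate, List.mem_singleton] at hx
    rcases hx with (⟨_, rfl⟩ | ⟨_, rfl⟩) | rfl
    · exact ha
    · exact hb
    · simp [keysB]
  have hy : (if ((dirpadA c).getD (0, 0)).1 - ((dirpadA p).getD (0, 0)).1 < 0 then '^' else 'v') ∈ keysB := by
    split <;> simp [keysB]
  have hx : (if ((dirpadA c).getD (0, 0)).2 - ((dirpadA p).getD (0, 0)).2 < 0 then '<' else '>') ∈ keysB := by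
    split <;> simp [keysB]
  simp only [bEntry]
  rw [h _ (hm _ _ _ _ hy hx), h _ (hm _ _ _ _ hx hy)]

-- lookups in a freshly built 25-entry table
lemma bBuild_getD (f : Char → Char → Int) (p c : Char)
    (hp : p ∈ keysB) (hc : c ∈ keysB) : (bBuild f).getD (p, c) 0 = f p c := by
  fin_cases hp <;> fin_cases hc <;>
    simp [bBuild, keysB, List.foldl, PySem.Dict.getD_insert]

-- path sums through a table matching a cost function equal the pure path sums
lemma bPathGo_eq (T : PySem.Dict (Char × Char) Int) (f : Char → Char → Int)
    (hT : ∀ p c, p ∈ keysB → c ∈ keysB → T.getD (p, c) 0 = f p c) :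
    ∀ (cs : List Char) (prev : Char) (t : Int), (∀ x ∈ cs, x ∈ keysB) → prev ∈ keysB →
      bPathGo T prev cs t = pPathGo f prev cs t := by
  intro cs
  induction cs with
  | nil => intro prev t _ _; simp [bPathGo, pPathGo]
  | cons c rest ih =>
    intro prev t hcs hprev
    have hc : c ∈ keysB := hcs c (by simp)
    rw [bPathGo, pPathGo, hT prev c hprev hc]
    exact ih c _ (fun x hx => hcs x (by simp [hx])) hc

-- the iterated table is the pure cost at its depth
lemma bTable_getD : ∀ (d : Nat) (p c : Char), p ∈ keysB → c ∈ keysB →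
    (bTable d).getD (p, c) 0 = pCost d p c := by
  intro d
  induction d with
  | zero =>
    intro p c hp hc
    simp only [bTable, List.range_zero, List.foldl_nil]
    rw [bBuild_getD _ _ _ hp hc, pCost]
  | succ n ih =>
    intro p c hp hc
    have hs : bTable (n + 1) = bStepT (bTable n) := by
      simp only [bTable, List.range_succ, List.foldl_append, List.foldl_cons, List.foldl_nil]
    rw [hs, bStepT, bBuild_getD _ _ _ hp hc]
    show bEntry _ p c = bEntry (fun mv => pPathGo (pCost n) 'A' mv 0) p c
    exact bEntry_congr _ _ p c (fun mv hmv =>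
      bPathGo_eq (bTable n) (pCost n) ih mv 'A' 0 hmv (by simp [keysB]))

-- cache invariant for A's memo list
def InvA (res : List ((List Char × Nat) × Int)) : Prop :=
  ∀ s r v, res.lookup (s, r) = some v → v = pPathGo (pCost r) 'A' s 0

-- A's cached recursion computes the pure path cost and preserves the invariant
lemma aRec_correct : ∀ (r : Nat) (s : List Char) (res : List ((List Char × Nat) × Int)),
    InvA res → (aRec r s res).1 = pPathGo (pCost r) 'A' s 0 ∧ InvA (aRec r s res).2 := by
  intro r
  induction r with
  | zero =>
    intro s res hres
    refine ⟨?_, by simpa [aRec] using hres⟩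
    simp [aRec, pPathGo_zero]
  | succ n ih =>
    -- the loop lemma, at this level
    have hloop : ∀ (chars : List Char) (prev : Char) (acc : Int)
        (res : List ((List Char × Nat) × Int)), InvA res →
        (chars.foldl (aStep (aRec n)) (((dirpadA prev).getD (0, 0), acc, res))).2.1 =
          pPathGo (pCost (n + 1)) prev chars acc ∧
        InvA (chars.foldl (aStep (aRec n)) (((dirpadA prev).getD (0, 0), acc, res))).2.2 := by
      intro chars
      induction chars with
      | nil => intro prev acc res hres; exact ⟨by simp [pPathGo], by simpa using hres⟩
      | cons c rest ihc =>
        intro prev acc res hres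
        rw [List.foldl_cons, pPathGo]
        simp only [aStep]
        have hq1 : ((dirpadA prev).getD (0, 0)).1 +
            (((dirpadA c).getD (0, 0)).1 - ((dirpadA prev).getD (0, 0)).1) =
            ((dirpadA c).getD (0, 0)).1 := by ring
        have hq2 : ((dirpadA prev).getD (0, 0)).2 +
            (((dirpadA c).getD (0, 0)).2 - ((dirpadA prev).getD (0, 0)).2) =
            ((dirpadA c).getD (0, 0)).2 := by ring
    -- pCost (n+1) prev c unfolds to bEntry over pPathGo (pCost n)
        simp only [hq1, hq2, pCost, bEntry]
        by_cases g1 : ((dirpadA prev).getD (0, 0)).2 ≠ 0 ∨ ((dirpadA c).getD (0, 0)).1 ≠ 0 <;>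
          by_cases g2 : ((dirpadA prev).getD (0, 0)).1 ≠ 0 ∨ ((dirpadA c).getD (0, 0)).2 ≠ 0 <;>
          simp only [g1, g2, if_pos, if_neg, not_false_iff] <;>
        · first
          | (obtain ⟨e1, h1⟩ := ih _ _ hres
             obtain ⟨e2, h2⟩ := ih _ _ h1
             rw [e1, e2] at *
             exact ihc c _ _ h2
            )
          | (obtain ⟨e1, h1⟩ := ih _ _ hres
             rw [e1] at *
             exact ihc c _ _ h1
            )
          | exact ihc c _ _ hres
    intro s res hres
    have hself : ((dirpadA 'A').getD (0, 0) : Int × Int) = (0, 2) := by decide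
    obtain ⟨e, hinv⟩ := hloop s 'A' 0 res hres
    rw [hself] at e hinv
    rcases hget : res.lookup (s, n + 1) with _ | v
    · constructor
      · simp only [aRec, hget]
        exact e
      · intro s' r' v' hv'
        simp only [aRec, hget, List.lookup] at hv'
        split at hv'
        · next h =>
            obtain ⟨h1, h2⟩ := Prod.mk.injEq .. ▸ (eq_of_beq h)
            simp only [Option.some.injEq] at hv'
            subst h1; subst h2
            rw [← hv']
            exact e
        · next => exact hinv s' r' v' hv'
    · constructor
      · simp only [aRec, hget]
        exact hres s (n + 1) v hget
      · intro s' r' v' hv'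
        simp only [aRec, hget] at hv'
        exact hres s' r' v' hv'

-- ===== VERDICT (by name: the statement is the Claim_ definition above) =====
theorem get_intermediate_sequences_len_spec : Claim_equal_get_intermediate_sequences_len := by
  intro sequence repeats _ hpre
  obtain ⟨hge, hle, hchars⟩ := hpre
  unfold Spec_get_intermediate_sequences_len get_intermediate_sequences_len get_intermediate_sequences_len_alt
  have hinv0 : InvA [] := by intro s r v h; simp [List.lookup] at h
  have hcap : repeats.toNat ≤ 900 := by omega
  rw [if_pos hcap]
  by_cases h0 : repeats = 0
  · subst h0
    simp [aRec, Int.toNat_zero]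
  · rw [if_neg h0, if_pos hcap]
    rcases hchars with h0' | hall
    · exact absurd h0' h0
    have hA := (aRec_correct repeats.toNat sequence.toList [] hinv0).1
    rw [hA]
    have hgood : ∀ x ∈ sequence.toList, x ∈ keysB := by
      intro x hx
      have := List.all_eq_true.mp hall x hx
      simpa [keysB] using this
    exact (bPathGo_eq (bTable repeats.toNat) (pCost repeats.toNat)
      (fun p c hp hc => bTable_getD repeats.toNat p c hp hc)
      sequence.toList 'A' 0 hgood (by simp [keysB])).symm
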